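-- pv_equiv track=rewrite | github.com/soviar-systems/ai_engineering_handbook | tools/scripts/validate_commit_msg.py | _parse_commit_message
-- ===== SOURCE A (Python) =====
-- def _parse_commit_message(text: str) -> tuple[str, list[str]]:
--     """Split commit message into subject and body lines.
--
--     Git commit message format:
--         subject line
--         <blank line>
--         body line 1
--         body line 2
--
--     Returns (subject, body_lines). Body lines exclude the blank separator.
--     """
--     lines = text.strip().splitlines()
--     if not lines:
--         return "", []
--
--     subject = lines[0].strip()
--
--     # Find body start (after first blank line)
--     body_start = None
--     for i, line in enumerate(lines[1:], start=1):
--         if not line.strip():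
--             body_start = i + 1
--             break
--
--     if body_start is None or body_start >= len(lines):
--         return subject, []
--
--     body_lines = [line for line in lines[body_start:] if line.strip()]
--     return subject, body_lines
-- ===== SOURCE B (Python) =====
-- def _parse_commit_message(text: str) -> tuple[str, list[str]]:
--     """Single linear pass with a seen_blank flag instead of search-then-filter."""
--     subject = ""
--     seen_blank = False
--     body_lines = []
--     for i, line in enumerate(text.strip().splitlines()):
--         if i == 0:
--             subject = line.strip()
--         elif not seen_blank:
--             if not line.strip():
--                 seen_blank = True
--         elif line.strip():
--             body_lines.append(line)
--     return subject, body_lines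
-- ===== Notes on version B (the rewrite author's own statement) =====
-- stated objective: simpler
-- what changed: Replaced A's index-search loop for the first blank line, bounds check and separate filter comprehension by one linear pass over the lines with a seen_blank flag and a body accumulator.
import Mathlib
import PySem

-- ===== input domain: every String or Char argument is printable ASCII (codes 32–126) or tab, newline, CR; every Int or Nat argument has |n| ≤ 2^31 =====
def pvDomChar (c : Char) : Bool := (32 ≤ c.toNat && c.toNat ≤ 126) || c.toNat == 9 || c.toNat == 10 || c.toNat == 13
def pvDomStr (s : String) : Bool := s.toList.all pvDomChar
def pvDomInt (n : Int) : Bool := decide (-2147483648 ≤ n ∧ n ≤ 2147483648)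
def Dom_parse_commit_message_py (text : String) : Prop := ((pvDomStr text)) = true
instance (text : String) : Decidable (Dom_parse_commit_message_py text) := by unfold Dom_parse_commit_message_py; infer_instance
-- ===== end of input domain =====

-- B replaces A's search-for-blank loop plus filter comprehension by one linear pass
-- with a seen_blank flag and an accumulator (objective: simpler, same asymptotic cost).

-- ===== PORT A =====
-- A's 'for i, line in enumerate(lines[1:], start=1): if not line.strip(): body_start = i+1; break'
def pvFindBlankA : List String → Nat → Option Nat
  | [], _ => none
  | l :: rest, i => if PySem.Str.strip l = "" then some (i + 1) else pvFindBlankA rest (i + 1)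

def parse_commit_message_py (text : String) : String × List String :=
  let lines := PySem.Str.splitlines (PySem.Str.strip text)
  match lines with
  | [] => ("", [])
  | first :: rest =>
    let subject := PySem.Str.strip first
    match pvFindBlankA rest 1 with
    | none => (subject, [])
    | some body_start =>
      if body_start ≥ lines.length then (subject, [])
      else
        -- lines[body_start:] with 0 ≤ body_start: exactly List.drop
        (subject, (lines.drop body_start).filter (fun l => !(PySem.Str.strip l == "")))

-- ===== PORT B =====
-- B's loop body for i ≥ 1 (i = 0 handled by the match below): flag + accumulator
def pvLoopB : List String → Bool → List String → List String
  | [], _, acc => acc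
  | l :: rest, seen, acc =>
    if !seen then
      if PySem.Str.strip l = "" then pvLoopB rest true acc else pvLoopB rest seen acc
    else
      if PySem.Str.strip l = "" then pvLoopB rest seen acc else pvLoopB rest seen (acc ++ [l])

def parse_commit_message_py_alt (text : String) : String × List String :=
  match PySem.Str.splitlines (PySem.Str.strip text) with
  | [] => ("", [])
  | first :: rest => (PySem.Str.strip first, pvLoopB rest false [])

-- ===== PRECONDITION & SPEC =====
def Spec_parse_commit_message_py (text : String) (out : String × List String) : Prop := out = parse_commit_message_py_alt text
instance (text : String) (out : String × List String) : Decidable (Spec_parse_commit_message_py text out) := by unfold Spec_parse_commit_message_py; infer_instance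

-- ===== CLAIM (what is proved, stated in full; the proofs are below) =====
def Claim_equal_parse_commit_message_py : Prop := ∀ (text : String), Dom_parse_commit_message_py text → Spec_parse_commit_message_py text (parse_commit_message_py text)

-- ===== LEMMAS AND PROOFS =====

theorem pvLoopB_true (rest : List String) : ∀ acc,
    pvLoopB rest true acc = acc ++ rest.filter (fun l => !(PySem.Str.strip l == "")) := by
  induction rest with
  | nil => intro acc; simp [pvLoopB]
  | cons l rest ih =>
    intro acc
    by_cases h : PySem.Str.strip l = "" <;> simp [pvLoopB, h, ih]

theorem pvFindBlankA_gt {rest : List String} : ∀ {i bs : Nat},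
    pvFindBlankA rest i = some bs → i < bs := by
  induction rest with
  | nil => intro i bs h; simp [pvFindBlankA] at h
  | cons l rest ih =>
    intro i bs h
    unfold pvFindBlankA at h
    split at h
    · cases h; omega
    · exact Nat.lt_of_succ_lt (ih h)

theorem pvLoopB_false (rest : List String) : ∀ (i : Nat) (acc : List String),
    pvLoopB rest false acc =
      match pvFindBlankA rest i with
      | none => acc
      | some bs => acc ++ (rest.drop (bs - i)).filter (fun l => !(PySem.Str.strip l == "")) := by
  induction rest with
  | nil => intro i acc; simp [pvLoopB, pvFindBlankA]
  | cons l rest ih =>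
    intro i acc
    by_cases h : PySem.Str.strip l = ""
    · simp only [pvLoopB, pvFindBlankA, h, if_pos, Bool.not_false]
      have : i + 1 - i = 1 := by omega
      simp [pvLoopB_true, this]
    · simp only [pvLoopB, pvFindBlankA, h, Bool.not_false, if_true, ite_false]
      rw [ih (i + 1) acc]
      cases hf : pvFindBlankA rest (i + 1) with
      | none => simp
      | some bs =>
        have hgt := pvFindBlankA_gt hf
        have h1 : bs - i = (bs - (i + 1)) + 1 := by omega
        simp [h1]

-- ===== VERDICT (by name: the statement is the Claim_ definition above) =====
theorem parse_commit_message_py_spec : Claim_equal_parse_commit_message_py := by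
  intro text _
  unfold Spec_parse_commit_message_py parse_commit_message_py parse_commit_message_py_alt
  cases hl : PySem.Str.splitlines (PySem.Str.strip text) with
  | nil => rfl
  | cons first rest =>
    simp only
    rw [pvLoopB_false rest 1 []]
    cases hf : pvFindBlankA rest 1 with
    | none => rfl
    | some bs =>
      have hgt : 1 < bs := pvFindBlankA_gt hf
      simp only [List.nil_append]
      by_cases hb : bs ≥ (first :: rest).length
      · rw [if_pos hb]
        have : rest.drop (bs - 1) = [] := by
          apply List.drop_eq_nil_of_le
          simp at hb; omega
        simp [this]
      · rw [if_neg hb]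
        have hdrop : (first :: rest).drop bs = rest.drop (bs - 1) := by
          have h1 : bs = (bs - 1) + 1 := by omega
          conv_lhs => rw [h1]
          rw [List.drop_succ_cons]
        rw [hdrop]
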